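-- pv_equiv track=rewrite | github.com/idocx/WHULibSeatReservation | core_value_code.py | str2cvc
-- ===== SOURCE A (Python) =====
-- data_list = ["富强", "民主", "文明", "和谐",
--              "爱国", "敬业", "诚信", "友善",
--              "公正", "自由", "平等", "法制"]
--
-- def str2cvc(string):
--     """
--     将其转化为core value编码
--     :param string: 需要编码的字符串
--     :return: 编码好的字符串
--     """
--     encoded_list = ["{:03}".format(word) for word in string.encode("utf-8")]
--     core_value_code = ""
--     i = 0
--     tmp = (0, 10, 11)
--     for each_code in encoded_list:
--         for each_num in each_code:
--             if each_num == 0: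
--                 core_value_code += data_list[tmp[i]]
--                 i += 1
--                 if i == 2:
--                     i = 0
--             else:
--                 core_value_code += data_list[int(each_num)]
--     return core_value_code
-- ===== SOURCE B (Python) =====
-- data_list = ["富强", "民主", "文明", "和谐",
--              "爱国", "敬业", "诚信", "友善",
--              "公正", "自由", "平等", "法制"]
--
-- def str2cvc(string):
--     parts = []
--     for b in string.encode("utf-8"):
--         parts.append(data_list[b // 100] + data_list[b // 10 % 10] + data_list[b % 10])
--     return "".join(parts)
-- ===== Notes on version B (the rewrite author's own statement) =====
-- stated objective: faster
-- what changed: B extracts each byte's three decimal digits arithmetically (b//100, b//10%10, b%10) and joins per-byte triples with str.join, instead of formatting every byte as a zero-padded string, iterating its characters with int() re-parsing, repeated string concatenation, and A's dead tmp/i machinery.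
import Mathlib
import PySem

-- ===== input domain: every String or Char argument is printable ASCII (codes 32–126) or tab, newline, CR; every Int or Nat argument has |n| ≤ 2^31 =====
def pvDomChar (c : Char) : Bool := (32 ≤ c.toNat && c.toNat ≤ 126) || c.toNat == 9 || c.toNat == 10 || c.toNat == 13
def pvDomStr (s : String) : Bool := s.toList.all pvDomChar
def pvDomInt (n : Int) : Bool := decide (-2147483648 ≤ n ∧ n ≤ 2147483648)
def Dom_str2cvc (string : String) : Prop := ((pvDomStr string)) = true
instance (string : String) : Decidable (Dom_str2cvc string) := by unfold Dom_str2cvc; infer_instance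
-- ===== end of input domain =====

-- B extracts each byte's three decimal digits arithmetically and joins per-byte triples,
-- instead of formatting each byte as a zero-padded string, re-parsing its characters with
-- int(), and carrying A's dead tmp/i machinery (objective: simpler).

-- On Dom (ASCII incl. tab/newline/CR) string.encode("utf-8") is exactly the list of char codes.
def pvBytes (string : String) : List Nat := string.toList.map Char.toNat

def pvData : List String :=
  ["富强", "民主", "文明", "和谐", "爱国", "敬业", "诚信", "友善", "公正", "自由", "平等", "法制"]

-- ===== PORT A =====
-- "{:03}".format(b): zero-padded 3-digit decimal, exact for 0 ≤ b ≤ 999 (bytes are ≤ 255)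
def pvFmt3 (n : Nat) : List Char :=
  [Char.ofNat (n / 100 + 48), Char.ofNat (n / 10 % 10 + 48), Char.ofNat (n % 10 + 48)]

-- inner loop body: 'each_num == 0' compares a str to the int 0, always False in Python,
-- so the tmp/i branch is dead; ported literally as an if on that constant-False test,
-- threading the (core_value_code, i) state. int(each_num) on a digit char is toNat - 48.
def pvInnerA (st : String × Nat) (c : Char) : String × Nat :=
  if False then (st.1 ++ pvData.getD ([0, 10, 11].getD st.2 0) "", st.2 + 1)  -- dead branch, kept literally
  else (st.1 ++ pvData.getD (c.toNat - 48) "", st.2)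

def str2cvc (string : String) : String :=
  let encoded_list := (pvBytes string).map pvFmt3
  let st := encoded_list.foldl (fun st each_code => each_code.foldl pvInnerA st) ("", 0)
  st.1

-- ===== PORT B =====
def str2cvc_alt (string : String) : String :=
  String.join ((pvBytes string).map (fun b =>
    pvData.getD (b / 100) "" ++ pvData.getD (b / 10 % 10) "" ++ pvData.getD (b % 10) ""))

-- ===== PRECONDITION & SPEC =====
def Spec_str2cvc (string : String) (out : String) : Prop := out = str2cvc_alt string
instance (string : String) (out : String) : Decidable (Spec_str2cvc string out) := by unfold Spec_str2cvc; infer_instance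

-- ===== CLAIM (what is proved, stated in full; the proofs are below) =====
def Claim_equal_str2cvc : Prop := ∀ (string : String), Dom_str2cvc string → Spec_str2cvc string (str2cvc string)

-- ===== LEMMAS AND PROOFS =====

theorem pv_digit_char (d : Nat) (hd : d ≤ 9) : (Char.ofNat (d + 48)).toNat - 48 = d := by
  interval_cases d <;> decide

theorem pv_inner_step (b : Nat) (hb : b ≤ 255) (core : String) (i : Nat) :
    (pvFmt3 b).foldl pvInnerA (core, i)
      = (core ++ (pvData.getD (b / 100) "" ++ pvData.getD (b / 10 % 10) "" ++ pvData.getD (b % 10) ""), i) := by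
  simp only [pvFmt3, List.foldl_cons, List.foldl_nil, pvInnerA, if_neg (by exact fun h => h)]
  rw [pv_digit_char (b / 100) (by omega), pv_digit_char (b / 10 % 10) (by omega),
      pv_digit_char (b % 10) (by omega)]
  simp [String.append_assoc]

theorem pv_foldl_append (l : List String) (a : String) :
    l.foldl (· ++ ·) a = a ++ l.foldl (· ++ ·) "" := by
  induction l generalizing a with
  | nil => simp
  | cons x xs ih =>
      rw [List.foldl_cons, List.foldl_cons, ih (a ++ x), ih ("" ++ x)]
      simp [String.append_assoc]

theorem pv_join_cons (s : String) (l : List String) :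
    String.join (s :: l) = s ++ String.join l := by
  simp only [String.join, List.foldl_cons]
  rw [pv_foldl_append l ("" ++ s)]
  simp

theorem pv_main (bs : List Nat) (hbs : ∀ b ∈ bs, b ≤ 255) (core : String) (i : Nat) :
    ((bs.map pvFmt3).foldl (fun st each_code => each_code.foldl pvInnerA st) (core, i)).1
      = core ++ String.join (bs.map (fun b =>
          pvData.getD (b / 100) "" ++ pvData.getD (b / 10 % 10) "" ++ pvData.getD (b % 10) "")) := by
  induction bs generalizing core i with
  | nil => simp [String.join]
  | cons b bs ih =>
      simp only [List.map_cons, List.foldl_cons]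
      rw [pv_inner_step b (hbs b (by simp)) core i,
          ih (fun x hx => hbs x (by simp [hx])) _ i, pv_join_cons]
      simp [String.append_assoc]

-- ===== VERDICT (by name: the statement is the Claim_ definition above) =====
theorem str2cvc_spec : Claim_equal_str2cvc := by
  intro s hdom
  unfold Spec_str2cvc str2cvc str2cvc_alt
  apply pv_main
  intro b hb
  simp only [pvBytes, List.mem_map] at hb
  obtain ⟨c, hc, rfl⟩ := hb
  have := List.all_eq_true.mp hdom c hc
  simp [pvDomChar] at this
  omega
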